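-- pv_equiv track=rewrite | github.com/wan-catherine/Leetcode | problems/N1442_Count_Triplet_That_Can_Form_Two_Arrays_Of_Equal_XOR.py | countTriplets_double
-- ===== SOURCE A (Python) =====
-- def countTriplets_double(arr):
--     res = 0
--     length = len(arr)
--     prefix_xor = [0] * (length + 1)
--     for i in range(length):
--         prefix_xor[i + 1] = arr[i] ^ prefix_xor[i]
--
--     for i in range(length):
--         for k in range(i+1,length):
--             if prefix_xor[i] == prefix_xor[k+1]:
--                 res += k - i
--     return res
-- ===== SOURCE B (Python) =====
-- def countTriplets_double(arr):
--     res = 0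
--     p = 0
--     cnt = {}
--     isum = {}
--     for k, x in enumerate(arr):
--         cnt[p] = cnt.get(p, 0) + 1
--         isum[p] = isum.get(p, 0) + k
--         p ^= x
--         res += cnt.get(p, 0) * k - isum.get(p, 0)
--     return res
-- ===== Notes on version B (the rewrite author's own statement) =====
-- stated objective: faster
-- what changed: Replaces A's quadratic scan over all (i,k) prefix-xor pairs by a single pass that keeps, per prefix-xor value, its occurrence count and index sum in hash maps, so each step adds cnt[p]*k - isum[p] directly.
import Mathlib
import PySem

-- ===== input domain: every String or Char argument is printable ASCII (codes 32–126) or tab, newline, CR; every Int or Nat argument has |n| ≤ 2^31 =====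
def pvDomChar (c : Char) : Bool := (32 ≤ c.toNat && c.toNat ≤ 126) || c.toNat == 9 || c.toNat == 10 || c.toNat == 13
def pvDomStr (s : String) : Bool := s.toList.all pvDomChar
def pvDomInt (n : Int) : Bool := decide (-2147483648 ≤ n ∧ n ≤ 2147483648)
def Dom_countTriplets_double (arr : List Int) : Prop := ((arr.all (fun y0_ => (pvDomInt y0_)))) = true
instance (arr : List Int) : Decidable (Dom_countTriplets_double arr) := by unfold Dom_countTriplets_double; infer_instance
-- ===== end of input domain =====

-- B replaces A's O(n^2) scan over prefix-xor pairs by one pass keeping per-prefix-xor count and index-sum in dicts (measured faster; asymptotic O(n) vs O(n^2)).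


-- ===== PORT A =====
def countTriplets_double (arr : List Int) : Int :=
  let res : Int := 0
  let length : Int := (arr.length : Int)
  let prefix_xor : List Int := List.replicate (arr.length + 1) (0 : Int)
  -- for i in range(length): prefix_xor[i + 1] = arr[i] ^ prefix_xor[i]
  -- (the assignment index i+1 is nonnegative and in range, so List.set with .toNat is exact)
  let prefix_xor := (PySem.List.pyRange 0 length 1).foldl
    (fun px i => px.set (i + 1).toNat
      (PySem.Int.bxor (PySem.List.pyGetD arr i 0) (PySem.List.pyGetD px i 0))) prefix_xor
  -- for i in range(length): for k in range(i+1, length): if prefix_xor[i] == prefix_xor[k+1]: res += k - i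
  let res := (PySem.List.pyRange 0 length 1).foldl (fun res i =>
    (PySem.List.pyRange (i + 1) length 1).foldl (fun res k =>
      if PySem.List.pyGetD prefix_xor i 0 = PySem.List.pyGetD prefix_xor (k + 1) 0
      then res + (k - i) else res) res) res
  res

-- ===== PORT B =====
def countTriplets_double_alt (arr : List Int) : Int :=
  -- one pass: cnt/isum map each prefix-xor value to its number of occurrences and to the sum of the indices it occurred at
  let st := (PySem.List.enumerate arr).foldl
    (fun (st : Int × Int × PySem.Dict Int Int × PySem.Dict Int Int) kx =>
      let res := st.1
      let p := st.2.1
      let cnt := st.2.2.1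
      let isum := st.2.2.2
      let cnt := cnt.insert p (cnt.getD p 0 + 1)
      let isum := isum.insert p (isum.getD p 0 + kx.1)
      let p := PySem.Int.bxor p kx.2
      (res + (cnt.getD p 0 * kx.1 - isum.getD p 0), p, cnt, isum))
    (0, 0, PySem.Dict.empty, PySem.Dict.empty)
  st.1

-- ===== PRECONDITION & SPEC =====
def Spec_countTriplets_double (arr : List Int) (out : Int) : Prop := out = countTriplets_double_alt arr
instance (arr : List Int) (out : Int) : Decidable (Spec_countTriplets_double arr out) := by unfold Spec_countTriplets_double; infer_instance

-- ===== CLAIM (what is proved, stated in full; the proofs are below) =====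
def Claim_equal_countTriplets_double : Prop := ∀ (arr : List Int), Dom_countTriplets_double arr → Spec_countTriplets_double arr (countTriplets_double arr)

-- ===== LEMMAS AND PROOFS =====

-- prefix-xor as a function: pxf arr j = arr[0] ^ … ^ arr[j-1], written exactly as A builds it
def pxf (arr : List Int) : Nat → Int
  | 0 => 0
  | j + 1 => PySem.Int.bxor (PySem.List.pyGetD arr (j : Int) 0) (pxf arr j)

-- the summand of the double loop
def Fp (arr : List Int) (i k : Nat) : Int :=
  if pxf arr i = pxf arr (k + 1) then (k : Int) - (i : Int) else 0

def innerv (arr : List Int) (k : Nat) : Int := ∑ i ∈ Finset.range (k + 1), Fp arr i k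

def Cnt (arr : List Int) (m : Nat) (v : Int) : Int :=
  ∑ j ∈ Finset.range m, (if pxf arr j = v then (1 : Int) else 0)

def Ssum (arr : List Int) (m : Nat) (v : Int) : Int :=
  ∑ j ∈ Finset.range m, (if pxf arr j = v then (j : Int) else 0)

def Bval (arr : List Int) : Int := ∑ k ∈ Finset.range arr.length, innerv arr k

lemma sum_map_range (n : Nat) (f : Nat → Int) :
    ((List.range n).map f).sum = ∑ i ∈ Finset.range n, f i := by
  induction n with
  | zero => simp
  | succ m ih => rw [List.range_succ, Finset.sum_range_succ]; simp [ih]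

lemma pxf_append (ys : List Int) (x : Int) (j : Nat) (hj : j ≤ ys.length) :
    pxf (ys ++ [x]) j = pxf ys j := by
  induction j with
  | zero => rfl
  | succ m ih =>
    have hm : m < ys.length := by omega
    have hget : PySem.List.pyGetD (ys ++ [x]) (m : Int) 0 = PySem.List.pyGetD ys (m : Int) 0 := by
      rw [PySem.List.pyGetD_natCast, PySem.List.pyGetD_natCast]
      rw [List.getD_eq_getElem?_getD, List.getD_eq_getElem?_getD, List.getElem?_append_left hm]
    simp only [pxf, hget, ih (by omega)]

lemma buildA_aux (arr : List Int) (c m : Nat) (h : m + c = arr.length) :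
    (PySem.List.pyRange (m : Int) (arr.length : Int) 1).foldl
      (fun px i => px.set (i + 1).toNat
        (PySem.Int.bxor (PySem.List.pyGetD arr i 0) (PySem.List.pyGetD px i 0)))
      ((List.range (arr.length + 1)).map (fun j => if j ≤ m then pxf arr j else 0))
    = (List.range (arr.length + 1)).map (pxf arr) := by
  induction c generalizing m with
  | zero =>
    have hm : m = arr.length := by omega
    subst hm
    have hnil : PySem.List.pyRange (arr.length : Int) (arr.length : Int) 1 = [] := by
      simp
    rw [hnil, List.foldl_nil]
    apply List.map_congr_left
    intro j hj
    simp only [List.mem_range] at hj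
    simp [Nat.lt_succ_iff.mp hj]
  | succ c ih =>
    have hlt : (m : Int) < (arr.length : Int) := by exact_mod_cast (by omega : m < arr.length)
    rw [PySem.List.pyRange_one_cons hlt, List.foldl_cons]
    have hstep :
        ((List.range (arr.length + 1)).map (fun j => if j ≤ m then pxf arr j else 0)).set
          ((m : Int) + 1).toNat
          (PySem.Int.bxor (PySem.List.pyGetD arr (m : Int) 0)
            (PySem.List.pyGetD
              ((List.range (arr.length + 1)).map (fun j => if j ≤ m then pxf arr j else 0)) (m : Int) 0))
        = (List.range (arr.length + 1)).map (fun j => if j ≤ m + 1 then pxf arr j else 0) := by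
      have hmn : m < arr.length + 1 := by omega
      have hget : PySem.List.pyGetD
          ((List.range (arr.length + 1)).map (fun j => if j ≤ m then pxf arr j else 0)) (m : Int) 0
          = pxf arr m := by
        rw [PySem.List.pyGetD_natCast, PySem.List.getD_map_range _ _ _ _ hmn]
        simp
      rw [hget]
      have htn : ((m : Int) + 1).toNat = m + 1 := by omega
      rw [htn]
      apply List.ext_getElem
      · simp
      · intro j h1 h2
        simp only [List.length_set, List.length_map, List.length_range] at h1
        rw [List.getElem_set]
        simp only [List.getElem_map, List.getElem_range]
        by_cases hj : m + 1 = j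
        · subst hj
          simp [pxf]
        · have : ¬ (j ≤ m + 1 ∧ ¬ j ≤ m) := by omega
          split_ifs with hc1 hc2 hc3 <;> first | rfl | omega
    rw [hstep]
    have : (m : Int) + 1 = ((m + 1 : Nat) : Int) := by push_cast; ring
    rw [this, ih (m + 1) (by omega)]

lemma buildA (arr : List Int) :
    (PySem.List.pyRange 0 (arr.length : Int) 1).foldl
      (fun px i => px.set (i + 1).toNat
        (PySem.Int.bxor (PySem.List.pyGetD arr i 0) (PySem.List.pyGetD px i 0)))
      (List.replicate (arr.length + 1) (0 : Int))
    = (List.range (arr.length + 1)).map (pxf arr) := by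
  have h0 : (List.replicate (arr.length + 1) (0 : Int))
      = (List.range (arr.length + 1)).map (fun j => if j ≤ 0 then pxf arr j else 0) := by
    apply List.ext_getElem
    · simp
    · intro j h1 h2
      simp only [List.getElem_replicate, List.getElem_map, List.getElem_range]
      by_cases hj : j = 0
      · subst hj; simp [pxf]
      · simp [hj]
  rw [h0]
  have := buildA_aux arr arr.length 0 (by omega)
  simpa using this

lemma pxf_get (arr : List Int) (m : Nat) (hm : m < arr.length + 1) :
    PySem.List.pyGetD ((List.range (arr.length + 1)).map (pxf arr)) (m : Int) 0 = pxf arr m := by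
  rw [PySem.List.pyGetD_natCast, PySem.List.getD_map_range _ _ _ _ hm]

lemma sum_map_pyRange (a b : Nat) (h : Int → Int) :
    ((PySem.List.pyRange (a : Int) (b : Int) 1).map h).sum = ∑ k ∈ Finset.Ico a b, h k := by
  rw [PySem.List.pyRange_one, List.map_map]
  have hab : (((b : Int)) - ((a : Int))).toNat = b - a := by omega
  rw [hab, sum_map_range, Finset.sum_Ico_eq_sum_range]
  apply Finset.sum_congr rfl
  intro j _
  simp only [Function.comp_apply]
  congr 1

lemma A_eq_sum (arr : List Int) :
    countTriplets_double arr
      = ∑ i ∈ Finset.range arr.length, ∑ k ∈ Finset.Ico (i + 1) arr.length, Fp arr i k := by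
  unfold countTriplets_double
  dsimp only
  rw [buildA]
  have hinner : ∀ (res : Int), ∀ i ∈ PySem.List.pyRange 0 (arr.length : Int) 1,
      (PySem.List.pyRange (i + 1) (arr.length : Int) 1).foldl
        (fun res k =>
          if PySem.List.pyGetD ((List.range (arr.length + 1)).map (pxf arr)) i 0
              = PySem.List.pyGetD ((List.range (arr.length + 1)).map (pxf arr)) (k + 1) 0
          then res + (k - i) else res) res
      = res + ∑ k ∈ Finset.Ico (i.toNat + 1) arr.length, Fp arr i.toNat k := by
    intro res i hi
    obtain ⟨hi0, hin⟩ := PySem.List.mem_pyRange_one.mp hi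
    have hieq : i = (i.toNat : Int) := by omega
    have hinat : i.toNat < arr.length := by omega
    have hstep : ∀ (res : Int), ∀ k ∈ PySem.List.pyRange (i + 1) (arr.length : Int) 1,
        (if PySem.List.pyGetD ((List.range (arr.length + 1)).map (pxf arr)) i 0
              = PySem.List.pyGetD ((List.range (arr.length + 1)).map (pxf arr)) (k + 1) 0
          then res + (k - i) else res)
        = res + (if pxf arr i.toNat = pxf arr (k.toNat + 1) then k - i else 0) := by
      intro res k hk
      obtain ⟨hk0, hkn⟩ := PySem.List.mem_pyRange_one.mp hk
      have hgi : PySem.List.pyGetD ((List.range (arr.length + 1)).map (pxf arr)) i 0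
          = pxf arr i.toNat := by
        rw [hieq]; exact pxf_get arr i.toNat (by omega)
      have hgk : PySem.List.pyGetD ((List.range (arr.length + 1)).map (pxf arr)) (k + 1) 0
          = pxf arr (k.toNat + 1) := by
        have : k + 1 = ((k.toNat + 1 : Nat) : Int) := by omega
        rw [this]; exact pxf_get arr (k.toNat + 1) (by omega)
      rw [hgi, hgk]
      split_ifs <;> omega
    rw [PySem.List.foldl_congr_mem _ _ _ _ hstep, PySem.List.foldl_add]
    congr 1
    have hir : i + 1 = ((i.toNat + 1 : Nat) : Int) := by omega
    rw [hir, sum_map_pyRange]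
    apply Finset.sum_congr rfl
    intro k hk
    obtain ⟨hk1, hk2⟩ := Finset.mem_Ico.mp hk
    unfold Fp
    have h1 : ((k : Int)).toNat = k := by omega
    rw [h1]
    split_ifs <;> omega
  rw [PySem.List.foldl_congr_mem _ _ _ _ hinner, PySem.List.foldl_add]
  have h0 : (0 : Int) = ((0 : Nat) : Int) := rfl
  rw [h0, sum_map_pyRange, ← Finset.range_eq_Ico]
  rw [Int.natCast_zero, zero_add]
  apply Finset.sum_congr rfl
  intro i _
  simp

lemma swap_sum (arr : List Int) :
    (∑ i ∈ Finset.range arr.length, ∑ k ∈ Finset.Ico (i + 1) arr.length, Fp arr i k)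
      = ∑ k ∈ Finset.range arr.length, innerv arr k := by
  have h1 : ∀ i ∈ Finset.range arr.length,
      (∑ k ∈ Finset.Ico (i + 1) arr.length, Fp arr i k)
        = ∑ k ∈ Finset.Ico i arr.length, Fp arr i k := by
    intro i hi
    rw [Finset.sum_eq_sum_Ico_succ_bot (Finset.mem_range.mp hi)]
    have h0 : Fp arr i i = 0 := by unfold Fp; split_ifs <;> simp
    rw [h0, zero_add]
  rw [Finset.sum_congr rfl h1, Finset.range_eq_Ico, Finset.sum_Ico_Ico_comm]
  apply Finset.sum_congr rfl
  intro k _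
  rw [← Finset.range_eq_Ico]
  rfl

lemma innerv_eq (arr : List Int) (k : Nat) :
    innerv arr k = Cnt arr (k + 1) (pxf arr (k + 1)) * k - Ssum arr (k + 1) (pxf arr (k + 1)) := by
  unfold innerv Cnt Ssum Fp
  rw [Finset.sum_mul, ← Finset.sum_sub_distrib]
  apply Finset.sum_congr rfl
  intro i _
  split_ifs <;> ring

lemma pyGetD_append_last (ys : List Int) (x : Int) :
    PySem.List.pyGetD (ys ++ [x]) ((ys.length : Nat) : Int) 0 = x := by
  rw [PySem.List.pyGetD_natCast]
  simp [List.getD_eq_getElem?_getD]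

lemma pxf_succ_append (ys : List Int) (x : Int) :
    pxf (ys ++ [x]) (ys.length + 1) = PySem.Int.bxor (pxf ys ys.length) x := by
  show PySem.Int.bxor (PySem.List.pyGetD (ys ++ [x]) ((ys.length : Nat) : Int) 0)
      (pxf (ys ++ [x]) ys.length) = _
  rw [pyGetD_append_last, pxf_append ys x _ le_rfl, PySem.Int.bxor_comm]

lemma Cnt_append (ys : List Int) (x : Int) (m : Nat) (v : Int) (hm : m ≤ ys.length + 1) :
    Cnt (ys ++ [x]) m v = Cnt ys m v := by
  apply Finset.sum_congr rfl
  intro j hj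
  rw [pxf_append ys x j (by have := Finset.mem_range.mp hj; omega)]

lemma Ssum_append (ys : List Int) (x : Int) (m : Nat) (v : Int) (hm : m ≤ ys.length + 1) :
    Ssum (ys ++ [x]) m v = Ssum ys m v := by
  apply Finset.sum_congr rfl
  intro j hj
  rw [pxf_append ys x j (by have := Finset.mem_range.mp hj; omega)]

lemma innerv_append (ys : List Int) (x : Int) (k : Nat) (hk : k < ys.length) :
    innerv (ys ++ [x]) k = innerv ys k := by
  apply Finset.sum_congr rfl
  intro i hi
  have hi' := Finset.mem_range.mp hi
  unfold Fp
  rw [pxf_append ys x i (by omega), pxf_append ys x (k + 1) (by omega)]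

lemma B_inv (arr : List Int) :
    ∃ c s : PySem.Dict Int Int,
      (PySem.List.enumerate arr).foldl
        (fun (st : Int × Int × PySem.Dict Int Int × PySem.Dict Int Int) kx =>
          let res := st.1
          let p := st.2.1
          let cnt := st.2.2.1
          let isum := st.2.2.2
          let cnt := cnt.insert p (cnt.getD p 0 + 1)
          let isum := isum.insert p (isum.getD p 0 + kx.1)
          let p := PySem.Int.bxor p kx.2
          (res + (cnt.getD p 0 * kx.1 - isum.getD p 0), p, cnt, isum))
        (0, 0, PySem.Dict.empty, PySem.Dict.empty)
      = (Bval arr, pxf arr arr.length, c, s)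
      ∧ (∀ v, c.getD v 0 = Cnt arr arr.length v)
      ∧ (∀ v, s.getD v 0 = Ssum arr arr.length v) := by
  induction arr using List.reverseRecOn with
  | nil =>
    refine ⟨PySem.Dict.empty, PySem.Dict.empty, ?_, ?_, ?_⟩
    · simp [PySem.List.enumerate_nil, Bval, pxf]
    · intro v; simp [PySem.Dict.getD_empty, Cnt]
    · intro v; simp [PySem.Dict.getD_empty, Ssum]
  | append_singleton ys x ih =>
    obtain ⟨c, s, hf, hc, hs⟩ := ih
    rw [PySem.List.enumerate_append, List.foldl_append, hf]
    rw [PySem.List.enumerate_cons, PySem.List.enumerate_nil, List.foldl_cons, List.foldl_nil]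
    dsimp only
    simp only [zero_add]
    set n := ys.length with hn
    set p := pxf ys n with hp
    have hlen : (ys ++ [x]).length = n + 1 := by simp [hn]
    have hpx1 : pxf (ys ++ [x]) (n + 1) = PySem.Int.bxor p x := pxf_succ_append ys x
    have hc' : ∀ v, (c.insert p (c.getD p 0 + 1)).getD v 0 = Cnt (ys ++ [x]) (n + 1) v := by
      intro v
      rw [PySem.Dict.getD_insert]
      have hcv : Cnt (ys ++ [x]) (n + 1) v = Cnt ys n v + (if p = v then 1 else 0) := by
        rw [Cnt_append ys x (n + 1) v (by omega)]
        show (∑ j ∈ Finset.range (n + 1), (if pxf ys j = v then (1 : Int) else 0)) = _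
        rw [Finset.sum_range_succ]
        rfl
      rw [hcv]
      by_cases hvp : v = p
      · rw [if_pos hvp, hvp, hc p, if_pos rfl]
      · rw [if_neg hvp, hc v, if_neg (fun h => hvp h.symm), add_zero]
    have hs' : ∀ v, (s.insert p (s.getD p 0 + (n : Int))).getD v 0 = Ssum (ys ++ [x]) (n + 1) v := by
      intro v
      rw [PySem.Dict.getD_insert]
      have hsv : Ssum (ys ++ [x]) (n + 1) v = Ssum ys n v + (if p = v then (n : Int) else 0) := by
        rw [Ssum_append ys x (n + 1) v (by omega)]
        show (∑ j ∈ Finset.range (n + 1), (if pxf ys j = v then (j : Int) else 0)) = _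
        rw [Finset.sum_range_succ]
        rfl
      rw [hsv]
      by_cases hvp : v = p
      · rw [if_pos hvp, hvp, hs p, if_pos rfl]
      · rw [if_neg hvp, hs v, if_neg (fun h => hvp h.symm), add_zero]
    refine ⟨c.insert p (c.getD p 0 + 1), s.insert p (s.getD p 0 + (n : Int)), ?_, ?_, ?_⟩
    · have hres : (c.insert p (c.getD p 0 + 1)).getD (PySem.Int.bxor p x) 0 * (n : Int)
            - (s.insert p (s.getD p 0 + (n : Int))).getD (PySem.Int.bxor p x) 0
          = innerv (ys ++ [x]) n := by
        rw [hc' (PySem.Int.bxor p x), hs' (PySem.Int.bxor p x), ← hpx1, innerv_eq]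
      have hbval : Bval (ys ++ [x]) = Bval ys + innerv (ys ++ [x]) n := by
        rw [Bval, hlen, Finset.sum_range_succ]
        congr 1
        apply Finset.sum_congr rfl
        intro k hk
        exact innerv_append ys x k (Finset.mem_range.mp hk)
      refine Prod.ext ?_ (Prod.ext ?_ rfl)
      · dsimp only
        rw [hres, hbval]
      · dsimp only
        rw [hlen, hpx1]
    · intro v
      rw [hc' v, hlen]
    · intro v
      rw [hs' v, hlen]

lemma B_eq (arr : List Int) : countTriplets_double_alt arr = Bval arr := by
  obtain ⟨c, s, hfold, _, _⟩ := B_inv arr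
  unfold countTriplets_double_alt
  simp only [hfold]

-- ===== VERDICT (by name: the statement is the Claim_ definition above) =====
theorem countTriplets_double_spec : Claim_equal_countTriplets_double := by
  intro arr _
  unfold Spec_countTriplets_double
  rw [B_eq, A_eq_sum, swap_sum, Bval]
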